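-- pv_equiv track=rewrite | github.com/tca19/advent-of-code | 2017/day04/day04.py | number_valid
-- ===== SOURCE A (Python) =====
-- def number_valid(passphrases):
--     """Return the number of valid passphrase (tuple) if:
--          - all words must be different (part 1)
--          - no words should be anagrams (part 2)
--     """
--
--     n_valid_1 = n_valid_2 = 0
--     for passphrase in passphrases:
--         words = passphrase.split()
--         sorted_words = [''.join(sorted(w)) for w in words]
--
--         if len(set(words)) == len(words):
--             n_valid_1 += 1
--         if len(set(sorted_words)) == len(words):
--             n_valid_2 += 1
--
--     return n_valid_1, n_valid_2
-- ===== SOURCE B (Python) =====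
-- def number_valid(passphrases):
--     """Return (count with all words distinct, count with no two words anagrams),
--     using sort-then-adjacent-comparison instead of set-size comparison."""
--     def no_adjacent_equal(ws):
--         return all(a != b for a, b in zip(ws, ws[1:]))
--
--     n_valid_1 = n_valid_2 = 0
--     for passphrase in passphrases:
--         words = passphrase.split()
--         if no_adjacent_equal(sorted(words)):
--             n_valid_1 += 1
--         if no_adjacent_equal(sorted(''.join(sorted(w)) for w in words)):
--             n_valid_2 += 1
--     return n_valid_1, n_valid_2
-- ===== Notes on version B (the rewrite author's own statement) =====
-- stated objective: alternative
-- what changed: Replaces the per-passphrase set-cardinality test (len(set(ws)) == len(ws)) by sorting the words (and the sorted-char anagram keys) and checking that no adjacent pair is equal, a sort-then-scan duplicate test.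
import Mathlib
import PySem

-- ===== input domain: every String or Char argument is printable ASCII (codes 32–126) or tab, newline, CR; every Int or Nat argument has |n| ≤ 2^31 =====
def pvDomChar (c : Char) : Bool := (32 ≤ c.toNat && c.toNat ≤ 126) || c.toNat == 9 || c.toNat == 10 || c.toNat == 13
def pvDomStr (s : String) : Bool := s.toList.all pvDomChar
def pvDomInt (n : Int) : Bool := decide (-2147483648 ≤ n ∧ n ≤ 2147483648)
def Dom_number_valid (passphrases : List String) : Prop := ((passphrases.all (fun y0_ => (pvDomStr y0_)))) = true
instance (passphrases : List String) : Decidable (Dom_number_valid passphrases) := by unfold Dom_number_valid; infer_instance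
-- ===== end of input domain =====

-- B replaces A's set-cardinality duplicate test by sorting and checking adjacent pairs (alternative algorithm, same results).

-- ''.join(sorted(w)) — the anagram key; identical expression in both Pythons
def pvSortKey (w : String) : String :=
  PySem.Str.join "" ((PySem.List.sorted w.toList (fun c => c) false).map (fun c => String.ofList [c]))

-- ===== PORT A =====
def number_valid (passphrases : List String) : Int × Int :=
  passphrases.foldl
    (fun acc passphrase =>
      let words := PySem.Str.split₀ passphrase
      let sorted_words := words.map pvSortKey
      let n1 := if PySem.Set.len (PySem.Set.ofList words) = PySem.List.len words then acc.1 + 1 else acc.1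
      let n2 := if PySem.Set.len (PySem.Set.ofList sorted_words) = PySem.List.len words then acc.2 + 1 else acc.2
      (n1, n2))
    (0, 0)

-- ===== PORT B =====
-- all(a != b for a, b in zip(ws, ws[1:]))
def pvNoAdjEq : List String → Bool
  | [] => true
  | [_] => true
  | a :: b :: t => (a ≠ b : Bool) && pvNoAdjEq (b :: t)

def number_valid_alt (passphrases : List String) : Int × Int :=
  passphrases.foldl
    (fun acc passphrase =>
      let words := PySem.Str.split₀ passphrase
      let n1 := if pvNoAdjEq (PySem.List.sorted words (fun w => w) false) then acc.1 + 1 else acc.1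
      let n2 := if pvNoAdjEq (PySem.List.sorted (words.map pvSortKey) (fun w => w) false) then acc.2 + 1 else acc.2
      (n1, n2))
    (0, 0)

-- ===== PRECONDITION & SPEC =====
def Spec_number_valid (passphrases : List String) (out : Int × Int) : Prop := out = number_valid_alt passphrases
instance (passphrases : List String) (out : Int × Int) : Decidable (Spec_number_valid passphrases out) := by unfold Spec_number_valid; infer_instance

-- ===== CLAIM (what is proved, stated in full; the proofs are below) =====
def Claim_equal_number_valid : Prop := ∀ (passphrases : List String), Dom_number_valid passphrases → Spec_number_valid passphrases (number_valid passphrases)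

-- ===== LEMMAS AND PROOFS =====

-- set-size test = Nodup
theorem pv_setlen_iff_nodup (xs : List String) :
    (PySem.Set.len (PySem.Set.ofList xs) = PySem.List.len xs) ↔ xs.Nodup := by
  constructor
  · intro h
    have hlen : (PySem.Set.ofList xs).length = xs.length := by
      simpa [PySem.Set.len, PySem.List.len] using h
    have hsub : (PySem.Set.ofList xs) ⊆ xs := by
      intro x hx; exact (PySem.Set.mem_ofList xs x).mp hx
    have hsp : List.Subperm (PySem.Set.ofList xs) xs :=
      List.subperm_of_subset (PySem.Set.nodup_ofList xs) hsub
    have hperm : (PySem.Set.ofList xs).Perm xs :=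
      hsp.perm_of_length_le (by omega)
    exact hperm.nodup_iff.mp (PySem.Set.nodup_ofList xs)
  · intro h
    rw [PySem.Set.ofList_eq_self_of_nodup xs h]
    simp [PySem.Set.len, PySem.List.len]

-- on a ≤-sorted list, the no-adjacent-equal scan decides Nodup
theorem pv_adj_iff_nodup : ∀ (l : List String), l.Pairwise (· ≤ ·) → (pvNoAdjEq l = true ↔ l.Nodup)
  | [] => fun _ => by simp [pvNoAdjEq]
  | [a] => fun _ => by simp [pvNoAdjEq]
  | a :: b :: t => fun hp => by
    have hp' : (b :: t).Pairwise (· ≤ ·) := hp.tail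
    have hab : a ≤ b := (List.pairwise_cons.mp hp).1 b (by simp)
    have hble : ∀ x ∈ t, b ≤ x := fun x hx => (List.pairwise_cons.mp hp').1 x hx
    have ih := pv_adj_iff_nodup (b :: t) hp'
    simp only [pvNoAdjEq, Bool.and_eq_true, decide_eq_true_eq, ih]
    constructor
    · rintro ⟨hne, hnd⟩
      refine List.nodup_cons.mpr ⟨fun hmem => ?_, hnd⟩
      rcases List.mem_cons.mp hmem with h | h
      · exact hne h
      · exact hne (le_antisymm hab (hble a h))
    · intro hnd
      exact ⟨fun h => (List.nodup_cons.mp hnd).1 (h ▸ List.mem_cons_self),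
        (List.nodup_cons.mp hnd).2⟩

-- the two per-passphrase tests agree
theorem pv_test_iff (xs : List String) :
    (PySem.Set.len (PySem.Set.ofList xs) = PySem.List.len xs)
      ↔ pvNoAdjEq (PySem.List.sorted xs (fun w => w) false) = true := by
  rw [pv_setlen_iff_nodup,
      pv_adj_iff_nodup _ (PySem.List.sorted_pairwise xs (fun w => w)),
      (PySem.List.sorted_perm xs (fun w => w) false).nodup_iff]

theorem pv_step_eq :
    (fun (acc : Int × Int) (passphrase : String) =>
      let words := PySem.Str.split₀ passphrase
      let sorted_words := words.map pvSortKey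
      let n1 := if PySem.Set.len (PySem.Set.ofList words) = PySem.List.len words then acc.1 + 1 else acc.1
      let n2 := if PySem.Set.len (PySem.Set.ofList sorted_words) = PySem.List.len words then acc.2 + 1 else acc.2
      ((n1, n2) : Int × Int))
    = (fun (acc : Int × Int) (passphrase : String) =>
      let words := PySem.Str.split₀ passphrase
      let n1 := if pvNoAdjEq (PySem.List.sorted words (fun w => w) false) then acc.1 + 1 else acc.1
      let n2 := if pvNoAdjEq (PySem.List.sorted (words.map pvSortKey) (fun w => w) false) then acc.2 + 1 else acc.2
      (n1, n2)) := by
  funext acc passphrase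
  have e1 := pv_test_iff (PySem.Str.split₀ passphrase)
  have e2 := pv_test_iff ((PySem.Str.split₀ passphrase).map pvSortKey)
  have hlen : PySem.List.len ((PySem.Str.split₀ passphrase).map pvSortKey)
      = PySem.List.len (PySem.Str.split₀ passphrase) := by
    simp [PySem.List.len]
  rw [hlen] at e2
  simp only [e1, e2]

-- ===== VERDICT (by name: the statement is the Claim_ definition above) =====
theorem number_valid_spec : Claim_equal_number_valid := by
  intro passphrases _
  unfold Spec_number_valid number_valid number_valid_alt
  rw [pv_step_eq]
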